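-- pv_equiv track=rewrite | github.com/sladouce/LocoGaze_UrbanTerrainTypes | spatial_correlations_plotting.py | order_terrains
-- ===== SOURCE A (Python) =====
-- def _norm_str(x: str) -> str:
--     return str(x).strip().lower() if x is not None else ""
--
-- def _terrain_rank_and_label(t_raw: str):
--     s = _norm_str(t_raw)
--     if "flat" in s:
--         return 0, "Flat", "flat"
--     if "cobble" in s:
--         return 1, "Cobblestones", "cobblestones"
--     if "green" in s:
--         return 2, "Green", "green"
--     return 99, (t_raw.strip().title() if t_raw else "Other"), (s or "other")
--
-- def order_terrains(terrains_list):
--     triples, labmap = [], {}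
--     for t in terrains_list:
--         rank, disp, canon = _terrain_rank_and_label(t)
--         triples.append((rank, t, disp, canon))
--         labmap[t] = (disp, canon)
--     triples.sort(key=lambda z: (z[0], z[1]))
--     return [z[1] for z in triples], labmap
-- ===== SOURCE B (Python) =====
-- def order_terrains(terrains_list):
--     flat, cobble, green, other = [], [], [], []
--     labmap = {}
--     for t in terrains_list:
--         s = t.strip().lower()
--         if "flat" in s:
--             flat.append(t)
--             labmap[t] = ("Flat", "flat")
--         elif "cobble" in s:
--             cobble.append(t)
--             labmap[t] = ("Cobblestones", "cobblestones")
--         elif "green" in s: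
--             green.append(t)
--             labmap[t] = ("Green", "green")
--         else:
--             other.append(t)
--             labmap[t] = ((t.strip().title() if t else "Other"), (s or "other"))
--     return sorted(flat) + sorted(cobble) + sorted(green) + sorted(other), labmap
-- ===== Notes on version B (the rewrite author's own statement) =====
-- stated objective: alternative
-- what changed: B replaces A's triple-building pass plus one stable sort on the composite key (rank, t) by a single dispatch pass into four rank buckets (no rank numbers, no tuples) followed by a plain per-bucket sort and concatenation.
import Mathlib
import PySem

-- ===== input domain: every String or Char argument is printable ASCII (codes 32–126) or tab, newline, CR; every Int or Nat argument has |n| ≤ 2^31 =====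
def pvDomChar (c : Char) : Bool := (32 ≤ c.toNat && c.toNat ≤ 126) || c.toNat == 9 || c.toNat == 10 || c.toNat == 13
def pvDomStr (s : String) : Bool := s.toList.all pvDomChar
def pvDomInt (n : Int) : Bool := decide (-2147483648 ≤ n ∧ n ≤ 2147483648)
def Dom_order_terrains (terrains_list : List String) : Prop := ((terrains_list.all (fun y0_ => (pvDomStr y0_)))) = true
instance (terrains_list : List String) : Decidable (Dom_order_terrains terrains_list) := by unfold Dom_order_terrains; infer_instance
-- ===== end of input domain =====

-- B replaces A's composite-key (rank, t) sort of 4-tuples by one dispatch pass into four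
-- rank buckets followed by a plain per-bucket sort and concatenation (objective: alternative).

-- ===== PORT A =====
-- hand port of str.title(): exact on the ASCII domain (cased characters = ASCII letters there)
def pvTitleChars : List Char → Bool → List Char
  | [], _ => []
  | c :: cs, prev =>
    if PySem.Chars.isalpha c then
      (if prev then PySem.Chars.lowerChar c else PySem.Chars.upperChar c) :: pvTitleChars cs true
    else c :: pvTitleChars cs false

def pvTitle (s : String) : String := String.ofList (pvTitleChars s.toList false)

-- _norm_str: the argument is always a str here, so the 'is not None' branch is always taken
def pvNormStr (x : String) : String := PySem.Str.lower (PySem.Str.strip x)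

-- _terrain_rank_and_label
def pvRankLabel (t_raw : String) : Int × String × String :=
  let s := pvNormStr t_raw
  if PySem.Str.isIn "flat" s then (0, "Flat", "flat")
  else if PySem.Str.isIn "cobble" s then (1, "Cobblestones", "cobblestones")
  else if PySem.Str.isIn "green" s then (2, "Green", "green")
  else (99, (if t_raw ≠ "" then pvTitle (PySem.Str.strip t_raw) else "Other"),
        (if s ≠ "" then s else "other"))

def order_terrains (terrains_list : List String) : List String × (List (String × String × String)) :=
  let st := terrains_list.foldl
    (fun (acc : List (Int × String × String × String) × PySem.Dict String (String × String)) t =>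
      let r := pvRankLabel t
      (acc.1 ++ [(r.1, t, r.2.1, r.2.2)], acc.2.insert t (r.2.1, r.2.2)))
    ([], PySem.Dict.empty)
  let sortedTriples := PySem.List.sorted2 st.1 (fun z => z.1) (fun z => z.2.1)
  (sortedTriples.map (fun z => z.2.1), st.2.items)

-- ===== PORT B =====
def order_terrains_alt (terrains_list : List String) : List String × (List (String × String × String)) :=
  let st := terrains_list.foldl
    (fun (acc : List String × List String × List String × List String × PySem.Dict String (String × String)) t =>
      let s := PySem.Str.lower (PySem.Str.strip t)
      if PySem.Str.isIn "flat" s then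
        (acc.1 ++ [t], acc.2.1, acc.2.2.1, acc.2.2.2.1, (acc.2.2.2.2).insert t ("Flat", "flat"))
      else if PySem.Str.isIn "cobble" s then
        (acc.1, acc.2.1 ++ [t], acc.2.2.1, acc.2.2.2.1, (acc.2.2.2.2).insert t ("Cobblestones", "cobblestones"))
      else if PySem.Str.isIn "green" s then
        (acc.1, acc.2.1, acc.2.2.1 ++ [t], acc.2.2.2.1, (acc.2.2.2.2).insert t ("Green", "green"))
      else
        (acc.1, acc.2.1, acc.2.2.1, acc.2.2.2.1 ++ [t],
         (acc.2.2.2.2).insert t ((if t ≠ "" then pvTitle (PySem.Str.strip t) else "Other"),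
                                 (if s ≠ "" then s else "other"))))
    ([], [], [], [], PySem.Dict.empty)
  (PySem.List.sorted st.1 (fun x => x) ++ PySem.List.sorted st.2.1 (fun x => x) ++
   PySem.List.sorted st.2.2.1 (fun x => x) ++ PySem.List.sorted st.2.2.2.1 (fun x => x),
   (st.2.2.2.2).items)

-- ===== PRECONDITION & SPEC =====
def Spec_order_terrains (terrains_list : List String) (out : List String × (List (String × String × String))) : Prop := out = order_terrains_alt terrains_list
instance (terrains_list : List String) (out : List String × (List (String × String × String))) : Decidable (Spec_order_terrains terrains_list out) := by unfold Spec_order_terrains; infer_instance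

-- ===== CLAIM (what is proved, stated in full; the proofs are below) =====
def Claim_equal_order_terrains : Prop := ∀ (terrains_list : List String), Dom_order_terrains terrains_list → Spec_order_terrains terrains_list (order_terrains terrains_list)

-- ===== LEMMAS AND PROOFS =====

-- the lexicographic comparison used by sorted2
def pvLt2 {α : Type} (k1 : α → Int) (k2 : α → String) (a b : α) : Bool :=
  decide (k1 a < k1 b) || (!decide (k1 b < k1 a) && decide (k2 a < k2 b))

lemma insertBy_nil {α : Type} (before : α → α → Bool) (x : α) :
    PySem.List.insertBy before x [] = [x] := rfl

lemma insertBy_cons {α : Type} (before : α → α → Bool) (x y : α) (ys : List α) :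
    PySem.List.insertBy before x (y :: ys) =
      if before x y then x :: y :: ys else y :: PySem.List.insertBy before x ys := rfl

lemma insertBy_skip {α : Type} (before : α → α → Bool) (x : α) (A B : List α)
    (h : ∀ y ∈ A, before x y = false) :
    PySem.List.insertBy before x (A ++ B) = A ++ PySem.List.insertBy before x B := by
  induction A with
  | nil => simp
  | cons a A ih =>
    have ha := h a (by simp)
    simp [insertBy_cons, ha, ih (fun y hy => h y (by simp [hy]))]

lemma insertBy_bucket {α : Type} (before before' : α → α → Bool) (x : α) (A C : List α)
    (h : ∀ y ∈ A, before x y = before' x y) (hC : ∀ c ∈ C, before x c = true) :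
    PySem.List.insertBy before x (A ++ C) = PySem.List.insertBy before' x A ++ C := by
  induction A with
  | nil =>
    cases C with
    | nil => simp [insertBy_nil]
    | cons c C' => simp [insertBy_cons, hC c (by simp), insertBy_nil]
  | cons a A ih =>
    have ha := h a (by simp)
    by_cases hb : before' x a = true
    · simp [insertBy_cons, ha, hb]
    · have hb' : before' x a = false := by simpa using hb
      simp [insertBy_cons, ha, hb', ih (fun y hy => h y (by simp [hy]))]

lemma insertBy_congr {α : Type} (before before' : α → α → Bool) (x : α) (A : List α)
    (h : ∀ y ∈ A, before x y = before' x y) :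
    PySem.List.insertBy before x A = PySem.List.insertBy before' x A := by
  have := insertBy_bucket before before' x A [] h (by simp)
  simpa using this

lemma insertBy_map {α β : Type} (f : α → β) (before : β → β → Bool) (before' : α → α → Bool)
    (h : ∀ a b, before (f a) (f b) = before' a b) (x : α) (l : List α) :
    PySem.List.insertBy before (f x) (l.map f) = (PySem.List.insertBy before' x l).map f := by
  induction l with
  | nil => simp [insertBy_nil]
  | cons a l ih =>
    by_cases hb : before' x a = true
    · simp [insertBy_cons, h, hb]
    · have hb' : before' x a = false := by simpa using hb
      simp [insertBy_cons, h, hb', ih]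

lemma foldl_insertBy_map {α β : Type} (f : α → β) (before : β → β → Bool) (before' : α → α → Bool)
    (h : ∀ a b, before (f a) (f b) = before' a b) (l : List α) (acc : List α) :
    List.foldl (fun a x => PySem.List.insertBy before x a) (acc.map f) (l.map f) =
      (List.foldl (fun a x => PySem.List.insertBy before' x a) acc l).map f := by
  induction l generalizing acc with
  | nil => simp
  | cons a l ih =>
    simp only [List.map_cons, List.foldl_cons]
    rw [insertBy_map f before before' h a acc]
    exact ih _

lemma sorted_map {α β : Type} (f : α → β) (key : β → String) (l : List α) :
    PySem.List.sorted (l.map f) key = (PySem.List.sorted l (fun a => key (f a))).map f := by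
  rw [PySem.List.sorted_eq_foldl_insertBy, PySem.List.sorted_eq_foldl_insertBy]
  have := foldl_insertBy_map f (fun a b => decide (key a < key b))
      (fun a b => decide (key (f a) < key (f b))) (fun a b => rfl) l []
  simpa using this

lemma sorted2_eq_foldl {α : Type} (xs : List α) (k1 : α → Int) (k2 : α → String) :
    PySem.List.sorted2 xs k1 k2 =
      List.foldl (fun acc x => PySem.List.insertBy (pvLt2 k1 k2) x acc) [] xs := rfl

lemma sorted_append_singleton {α : Type} (B : List α) (x : α) (key : α → String) :
    PySem.List.sorted (B ++ [x]) key =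
      PySem.List.insertBy (fun a b => decide (key a < key b)) x (PySem.List.sorted B key) := by
  rw [PySem.List.sorted_eq_foldl_insertBy, PySem.List.sorted_eq_foldl_insertBy, List.foldl_append]
  rfl

lemma mem_sorted_filter {α : Type} (p : α → Bool) (xs : List α) (key : α → String) (y : α)
    (hy : y ∈ PySem.List.sorted (xs.filter p) key) : p y = true := by
  rw [PySem.List.mem_sorted] at hy
  exact (List.mem_filter.mp hy).2

lemma sorted2_four {α : Type} (xs : List α) (k1 : α → Int) (k2 : α → String)
    (h : ∀ x ∈ xs, k1 x = 0 ∨ k1 x = 1 ∨ k1 x = 2 ∨ k1 x = 99) :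
    PySem.List.sorted2 xs k1 k2 =
      PySem.List.sorted (xs.filter (fun x => k1 x == 0)) k2 ++
      PySem.List.sorted (xs.filter (fun x => k1 x == 1)) k2 ++
      PySem.List.sorted (xs.filter (fun x => k1 x == 2)) k2 ++
      PySem.List.sorted (xs.filter (fun x => k1 x == 99)) k2 := by
  induction xs using List.reverseRecOn with
  | nil => rfl
  | append_singleton xs x ih =>
    have hx := h x (by simp)
    have ihh := ih (fun y hy => h y (by simp [hy]))
    have H0 : ∀ y ∈ PySem.List.sorted (xs.filter (fun z => k1 z == 0)) k2, k1 y = 0 := by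
      intro y hy; have := mem_sorted_filter _ _ _ _ hy; simpa using this
    have H1 : ∀ y ∈ PySem.List.sorted (xs.filter (fun z => k1 z == 1)) k2, k1 y = 1 := by
      intro y hy; have := mem_sorted_filter _ _ _ _ hy; simpa using this
    have H2 : ∀ y ∈ PySem.List.sorted (xs.filter (fun z => k1 z == 2)) k2, k1 y = 2 := by
      intro y hy; have := mem_sorted_filter _ _ _ _ hy; simpa using this
    have H99 : ∀ y ∈ PySem.List.sorted (xs.filter (fun z => k1 z == 99)) k2, k1 y = 99 := by
      intro y hy; have := mem_sorted_filter _ _ _ _ hy; simpa using this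
    rw [sorted2_eq_foldl, List.foldl_append]
    simp only [List.foldl_cons, List.foldl_nil]
    rw [← sorted2_eq_foldl, ihh]
    rcases hx with hx | hx | hx | hx
    · -- k1 x = 0 : x is inserted at the end of its k2-position in the first bucket
      have hA : ∀ y ∈ PySem.List.sorted (xs.filter (fun z => k1 z == 0)) k2,
          pvLt2 k1 k2 x y = decide (k2 x < k2 y) := by
        intro y hy; simp [pvLt2, hx, H0 y hy]
      have hC : ∀ c ∈ PySem.List.sorted (xs.filter (fun z => k1 z == 1)) k2 ++
          (PySem.List.sorted (xs.filter (fun z => k1 z == 2)) k2 ++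
           PySem.List.sorted (xs.filter (fun z => k1 z == 99)) k2),
          pvLt2 k1 k2 x c = true := by
        intro c hc
        rcases List.mem_append.mp hc with hc | hc
        · simp [pvLt2, hx, H1 c hc]
        · rcases List.mem_append.mp hc with hc | hc
          · simp [pvLt2, hx, H2 c hc]
          · simp [pvLt2, hx, H99 c hc]
      rw [List.append_assoc, List.append_assoc,
          insertBy_bucket (pvLt2 k1 k2) (fun a b => decide (k2 a < k2 b)) x _ _ hA hC,
          ← sorted_append_singleton]
      simp [List.filter_append, hx, List.append_assoc]
    · -- k1 x = 1
      have hSkip : ∀ y ∈ PySem.List.sorted (xs.filter (fun z => k1 z == 0)) k2,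
          pvLt2 k1 k2 x y = false := by
        intro y hy; simp [pvLt2, hx, H0 y hy]
      have hA : ∀ y ∈ PySem.List.sorted (xs.filter (fun z => k1 z == 1)) k2,
          pvLt2 k1 k2 x y = decide (k2 x < k2 y) := by
        intro y hy; simp [pvLt2, hx, H1 y hy]
      have hC : ∀ c ∈ PySem.List.sorted (xs.filter (fun z => k1 z == 2)) k2 ++
          PySem.List.sorted (xs.filter (fun z => k1 z == 99)) k2,
          pvLt2 k1 k2 x c = true := by
        intro c hc
        rcases List.mem_append.mp hc with hc | hc
        · simp [pvLt2, hx, H2 c hc]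
        · simp [pvLt2, hx, H99 c hc]
      rw [List.append_assoc, List.append_assoc, List.append_assoc,
          insertBy_skip (pvLt2 k1 k2) x _ _ hSkip,
          insertBy_bucket (pvLt2 k1 k2) (fun a b => decide (k2 a < k2 b)) x _ _ hA hC,
          ← sorted_append_singleton]
      simp [List.filter_append, hx, List.append_assoc]
    · -- k1 x = 2
      have hSkip : ∀ y ∈ PySem.List.sorted (xs.filter (fun z => k1 z == 0)) k2 ++
          PySem.List.sorted (xs.filter (fun z => k1 z == 1)) k2,
          pvLt2 k1 k2 x y = false := by
        intro y hy
        rcases List.mem_append.mp hy with hy | hy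
        · simp [pvLt2, hx, H0 y hy]
        · simp [pvLt2, hx, H1 y hy]
      have hA : ∀ y ∈ PySem.List.sorted (xs.filter (fun z => k1 z == 2)) k2,
          pvLt2 k1 k2 x y = decide (k2 x < k2 y) := by
        intro y hy; simp [pvLt2, hx, H2 y hy]
      have hC : ∀ c ∈ PySem.List.sorted (xs.filter (fun z => k1 z == 99)) k2,
          pvLt2 k1 k2 x c = true := by
        intro c hc; simp [pvLt2, hx, H99 c hc]
      rw [List.append_assoc, List.append_assoc, ← List.append_assoc
            (PySem.List.sorted (xs.filter (fun z => k1 z == 0)) k2),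
          insertBy_skip (pvLt2 k1 k2) x _ _ hSkip,
          insertBy_bucket (pvLt2 k1 k2) (fun a b => decide (k2 a < k2 b)) x _ _ hA hC,
          ← sorted_append_singleton]
      simp [List.filter_append, hx, List.append_assoc]
    · -- k1 x = 99
      have hSkip : ∀ y ∈ PySem.List.sorted (xs.filter (fun z => k1 z == 0)) k2 ++
          (PySem.List.sorted (xs.filter (fun z => k1 z == 1)) k2 ++
           PySem.List.sorted (xs.filter (fun z => k1 z == 2)) k2),
          pvLt2 k1 k2 x y = false := by
        intro y hy
        rcases List.mem_append.mp hy with hy | hy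
        · simp [pvLt2, hx, H0 y hy]
        · rcases List.mem_append.mp hy with hy | hy
          · simp [pvLt2, hx, H1 y hy]
          · simp [pvLt2, hx, H2 y hy]
      have hA : ∀ y ∈ PySem.List.sorted (xs.filter (fun z => k1 z == 99)) k2,
          pvLt2 k1 k2 x y = decide (k2 x < k2 y) := by
        intro y hy; simp [pvLt2, hx, H99 y hy]
      rw [List.append_assoc, List.append_assoc, ← List.append_assoc
            (PySem.List.sorted (xs.filter (fun z => k1 z == 1)) k2),
          ← List.append_assoc (PySem.List.sorted (xs.filter (fun z => k1 z == 0)) k2),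
          insertBy_skip (pvLt2 k1 k2) x _ _ hSkip,
          insertBy_congr (pvLt2 k1 k2) (fun a b => decide (k2 a < k2 b)) x _ hA,
          ← sorted_append_singleton]
      simp [List.filter_append, hx, List.append_assoc]

lemma rankLabel_cases (t : String) :
    (pvRankLabel t).1 = 0 ∨ (pvRankLabel t).1 = 1 ∨ (pvRankLabel t).1 = 2 ∨ (pvRankLabel t).1 = 99 := by
  unfold pvRankLabel
  split_ifs <;> simp_all <;> split_ifs <;> simp

def pvMk (t : String) : Int × String × String × String :=
  ((pvRankLabel t).1, t, (pvRankLabel t).2.1, (pvRankLabel t).2.2)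

def pvDStep (d : PySem.Dict String (String × String)) (t : String) :
    PySem.Dict String (String × String) :=
  d.insert t ((pvRankLabel t).2.1, (pvRankLabel t).2.2)

def pF (t : String) : Bool := PySem.Str.isIn "flat" (pvNormStr t)
def pC (t : String) : Bool := !pF t && PySem.Str.isIn "cobble" (pvNormStr t)
def pG (t : String) : Bool :=
  !pF t && !PySem.Str.isIn "cobble" (pvNormStr t) && PySem.Str.isIn "green" (pvNormStr t)
def pO (t : String) : Bool :=
  !pF t && !PySem.Str.isIn "cobble" (pvNormStr t) && !PySem.Str.isIn "green" (pvNormStr t)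

lemma afold (l : List String) (acc : List (Int × String × String × String))
    (d : PySem.Dict String (String × String)) :
    l.foldl
      (fun (acc : List (Int × String × String × String) × PySem.Dict String (String × String)) t =>
        let r := pvRankLabel t
        (acc.1 ++ [(r.1, t, r.2.1, r.2.2)], acc.2.insert t (r.2.1, r.2.2))) (acc, d)
      = (acc ++ l.map pvMk, l.foldl pvDStep d) := by
  induction l generalizing acc d with
  | nil => simp
  | cons a l ih =>
    simp only [List.foldl_cons, List.map_cons]
    rw [ih]
    simp [pvMk, pvDStep]

lemma bfold (l : List String) (f c g o : List String) (d : PySem.Dict String (String × String)) :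
    l.foldl
      (fun (acc : List String × List String × List String × List String × PySem.Dict String (String × String)) t =>
        let s := PySem.Str.lower (PySem.Str.strip t)
        if PySem.Str.isIn "flat" s then
          (acc.1 ++ [t], acc.2.1, acc.2.2.1, acc.2.2.2.1, (acc.2.2.2.2).insert t ("Flat", "flat"))
        else if PySem.Str.isIn "cobble" s then
          (acc.1, acc.2.1 ++ [t], acc.2.2.1, acc.2.2.2.1, (acc.2.2.2.2).insert t ("Cobblestones", "cobblestones"))
        else if PySem.Str.isIn "green" s then
          (acc.1, acc.2.1, acc.2.2.1 ++ [t], acc.2.2.2.1, (acc.2.2.2.2).insert t ("Green", "green"))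
        else
          (acc.1, acc.2.1, acc.2.2.1, acc.2.2.2.1 ++ [t],
           (acc.2.2.2.2).insert t ((if t ≠ "" then pvTitle (PySem.Str.strip t) else "Other"),
                                   (if s ≠ "" then s else "other")))) (f, c, g, o, d)
      = (f ++ l.filter pF, c ++ l.filter pC, g ++ l.filter pG, o ++ l.filter pO,
         l.foldl pvDStep d) := by
  induction l generalizing f c g o d with
  | nil => simp
  | cons a l ih =>
    simp only [List.foldl_cons]
    split_ifs with h1 h2 h3 <;> rw [ih] <;>
      (simp_all [List.filter_cons, pF, pC, pG, pO, pvDStep, pvRankLabel, pvNormStr,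
        List.append_assoc]) <;>
      simp_all [show PySem.Chars.isIn ['f', 'l', 'a', 't'] ([] : List Char) = false from by decide,
        show PySem.Chars.isIn ['c', 'o', 'b', 'b', 'l', 'e'] ([] : List Char) = false from by decide,
        show PySem.Chars.isIn ['g', 'r', 'e', 'e', 'n'] ([] : List Char) = false from by decide]

lemma pvRankEqZero (t : String) : ((pvMk t).1 == (0 : Int)) = pF t := by
  simp only [pvMk, pvRankLabel]
  split_ifs <;> simp_all [pF, pC, pG, pO]

lemma pvRankEqOne (t : String) : ((pvMk t).1 == (1 : Int)) = pC t := by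
  simp only [pvMk, pvRankLabel]
  split_ifs <;> simp_all [pF, pC, pG, pO]

lemma pvRankEqTwo (t : String) : ((pvMk t).1 == (2 : Int)) = pG t := by
  simp only [pvMk, pvRankLabel]
  split_ifs <;> simp_all [pF, pC, pG, pO]

lemma pvRankEq99 (t : String) : ((pvMk t).1 == (99 : Int)) = pO t := by
  simp only [pvMk, pvRankLabel]
  split_ifs <;> simp_all [pF, pC, pG, pO]

lemma filter_mk (l : List String) (r : Int) (p : String → Bool)
    (hp : ∀ t, ((pvMk t).1 == r) = p t) :
    (l.map pvMk).filter (fun z => z.1 == r) = (l.filter p).map pvMk := by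
  induction l with
  | nil => rfl
  | cons a l ih =>
    simp only [List.map_cons, List.filter_cons]
    rw [hp a]
    by_cases hpa : p a = true
    · simp [hpa, ih]
    · simp only [Bool.not_eq_true] at hpa
      simp [hpa, ih]

-- ===== VERDICT (by name: the statement is the Claim_ definition above) =====
set_option maxHeartbeats 1000000 in
theorem order_terrains_spec : Claim_equal_order_terrains := by
  intro l _
  unfold Spec_order_terrains order_terrains order_terrains_alt
  rw [afold, bfold]
  simp only [List.nil_append]
  have hvals : ∀ z ∈ l.map pvMk, z.1 = 0 ∨ z.1 = 1 ∨ z.1 = 2 ∨ z.1 = 99 := by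
    intro z hz
    obtain ⟨t, _, rfl⟩ := List.mem_map.mp hz
    simp only [pvMk]
    exact rankLabel_cases t
  rw [sorted2_four (l.map pvMk) (fun z => z.1) (fun z => z.2.1) hvals,
      filter_mk l 0 pF pvRankEqZero, filter_mk l 1 pC pvRankEqOne,
      filter_mk l 2 pG pvRankEqTwo, filter_mk l 99 pO pvRankEq99]
  simp only [List.map_append]
  rw [sorted_map, sorted_map, sorted_map, sorted_map]
  simp only [List.map_map]
  have hid : ((fun (z : Int × String × String × String) => z.2.1) ∘ pvMk) =
      fun (t : String) => t := rfl
  rw [hid]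
  simp only [List.map_id']
  rfl
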